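-- pv_equiv track=rewrite | github.com/Qiratsumra/todo-phase-3-backend | utils/error_handler.py | get_task_management_fallback
-- ===== SOURCE A (Python) =====
-- def get_task_management_fallback(user_message: str) -> str:
--     """Generate contextual fallback for task management queries"""
--     message_lower = user_message.lower()
--
--     # Detect intent from keywords
--     if any(word in message_lower for word in ['create', 'add', 'new task']):
--         return (
--             "I'd like to help you create a task, but I'm currently experiencing "
--             "API limitations. Please try one of these:\n\n"
--             "• Use the task creation form directly in the UI\n"
--             "• Try again in a few minutes\n"
--             "• Or tell me: What task would you like to create? "
--             "(title, description, priority, due date)"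
--         )
--
--     elif any(word in message_lower for word in ['list', 'show', 'view', 'tasks']):
--         return (
--             "I can't fetch your tasks right now due to API limits, but you can:\n\n"
--             "• View all tasks in the main dashboard\n"
--             "• Refresh the page to see your latest tasks\n"
--             "• Try asking again in a moment"
--         )
--
--     elif any(word in message_lower for word in ['update', 'edit', 'change', 'modify']):
--         return (
--             "I'm unable to process task updates at the moment. You can:\n\n"
--             "• Edit tasks directly from the task list\n"
--             "• Try again shortly\n"
--             "• Let me know which task you want to update and I'll help once available"
--         )
--
--     elif any(word in message_lower for word in ['delete', 'remove', 'cancel']):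
--         return (
--             "I can't process deletions right now due to API constraints. Instead:\n\n"
--             "• Delete tasks using the delete button in the UI\n"
--             "• Retry in a few minutes\n"
--             "• Tell me which task to delete for when I'm back online"
--         )
--
--     elif any(word in message_lower for word in ['search', 'find']):
--         return (
--             "Search is temporarily unavailable. Meanwhile:\n\n"
--             "• Use the search bar in the task dashboard\n"
--             "• Filter tasks by status or priority\n"
--             "• Try your search again shortly"
--         )
--
--     elif any(word in message_lower for word in ['recommend', 'suggest', 'priority']):
--         return (
--             "I can't provide recommendations right now, but here are some tips:\n\n"
--             "• Focus on high-priority tasks first\n"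
--             "• Check tasks with approaching due dates\n"
--             "• Review overdue tasks in your dashboard\n"
--             "• I'll be able to give personalized suggestions soon!"
--         )
--
--     else:
--         return (
--             "I'm currently experiencing API limitations and can't process your request fully. "
--             "However, you can:\n\n"
--             "• Use the task management UI directly\n"
--             "• Try again in a few minutes\n"
--             "• Check https://status.google.com for Gemini API status\n\n"
--             "Your data is safe, and I'll be back to help soon!"
--         )
-- ===== SOURCE B (Python) =====
-- _KEYWORDS = [
--     ('create', 0), ('add', 0), ('new task', 0),
--     ('list', 1), ('show', 1), ('view', 1), ('tasks', 1),
--     ('update', 2), ('edit', 2), ('change', 2), ('modify', 2),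
--     ('delete', 3), ('remove', 3), ('cancel', 3),
--     ('search', 4), ('find', 4),
--     ('recommend', 5), ('suggest', 5), ('priority', 5),
-- ]
--
-- _RESPONSES = [
--     "I'd like to help you create a task, but I'm currently experiencing "
--     "API limitations. Please try one of these:\n\n"
--     "\u2022 Use the task creation form directly in the UI\n"
--     "\u2022 Try again in a few minutes\n"
--     "\u2022 Or tell me: What task would you like to create? "
--     "(title, description, priority, due date)",
--
--     "I can't fetch your tasks right now due to API limits, but you can:\n\n"
--     "\u2022 View all tasks in the main dashboard\n"
--     "\u2022 Refresh the page to see your latest tasks\n"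
--     "\u2022 Try asking again in a moment",
--
--     "I'm unable to process task updates at the moment. You can:\n\n"
--     "\u2022 Edit tasks directly from the task list\n"
--     "\u2022 Try again shortly\n"
--     "\u2022 Let me know which task you want to update and I'll help once available",
--
--     "I can't process deletions right now due to API constraints. Instead:\n\n"
--     "\u2022 Delete tasks using the delete button in the UI\n"
--     "\u2022 Retry in a few minutes\n"
--     "\u2022 Tell me which task to delete for when I'm back online",
--
--     "Search is temporarily unavailable. Meanwhile:\n\n"
--     "\u2022 Use the search bar in the task dashboard\n"
--     "\u2022 Filter tasks by status or priority\n"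
--     "\u2022 Try your search again shortly",
--
--     "I can't provide recommendations right now, but here are some tips:\n\n"
--     "\u2022 Focus on high-priority tasks first\n"
--     "\u2022 Check tasks with approaching due dates\n"
--     "\u2022 Review overdue tasks in your dashboard\n"
--     "\u2022 I'll be able to give personalized suggestions soon!",
--
--     "I'm currently experiencing API limitations and can't process your request fully. "
--     "However, you can:\n\n"
--     "\u2022 Use the task management UI directly\n"
--     "\u2022 Try again in a few minutes\n"
--     "\u2022 Check https://status.google.com for Gemini API status\n\n"
--     "Your data is safe, and I'll be back to help soon!",
-- ]
--
--
-- def get_task_management_fallback(user_message: str) -> str: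
--     """Generate contextual fallback for task management queries"""
--     m = user_message.lower()
--     # Single left-to-right scan of the message: at every position see which
--     # keywords start there and keep the best (lowest) intent index found.
--     best = 6  # index of the default response
--     for i in range(len(m)):
--         for kw, g in _KEYWORDS:
--             if g < best and m.startswith(kw, i):
--                 best = g
--     return _RESPONSES[best]
-- ===== Notes on version B (the rewrite author's own statement) =====
-- stated objective: alternative
-- what changed: Instead of A's keyword-driven cascade of substring searches, B makes a single left-to-right scan of the lowered message, checking at each position which keywords start there and keeping the lowest (highest-priority) matched intent index, then indexes a response table.
import Mathlib
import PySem

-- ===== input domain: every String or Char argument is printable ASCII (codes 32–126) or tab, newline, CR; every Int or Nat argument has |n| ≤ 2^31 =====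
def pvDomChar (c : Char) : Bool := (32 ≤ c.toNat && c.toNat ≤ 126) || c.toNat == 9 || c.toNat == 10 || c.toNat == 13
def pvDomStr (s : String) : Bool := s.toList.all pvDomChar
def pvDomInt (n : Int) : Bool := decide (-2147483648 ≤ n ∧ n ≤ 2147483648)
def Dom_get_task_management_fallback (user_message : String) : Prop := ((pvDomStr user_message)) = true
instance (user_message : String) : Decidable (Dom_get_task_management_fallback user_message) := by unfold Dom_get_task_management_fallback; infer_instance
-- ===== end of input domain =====

-- B replaces A's keyword-driven if/elif cascade by one left-to-right scan of the message that tracks the best matched intent index (objective: alternative).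

-- ===== PORT A =====
def get_task_management_fallback (user_message : String) : String :=
  let message_lower := PySem.Str.lower user_message
  if (["create", "add", "new task"]).any (fun word => PySem.Str.isIn word message_lower) then
    "I'd like to help you create a task, but I'm currently experiencing API limitations. Please try one of these:\n\n\u2022 Use the task creation form directly in the UI\n\u2022 Try again in a few minutes\n\u2022 Or tell me: What task would you like to create? (title, description, priority, due date)"
  else if (["list", "show", "view", "tasks"]).any (fun word => PySem.Str.isIn word message_lower) then
    "I can't fetch your tasks right now due to API limits, but you can:\n\n\u2022 View all tasks in the main dashboard\n\u2022 Refresh the page to see your latest tasks\n\u2022 Try asking again in a moment"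
  else if (["update", "edit", "change", "modify"]).any (fun word => PySem.Str.isIn word message_lower) then
    "I'm unable to process task updates at the moment. You can:\n\n\u2022 Edit tasks directly from the task list\n\u2022 Try again shortly\n\u2022 Let me know which task you want to update and I'll help once available"
  else if (["delete", "remove", "cancel"]).any (fun word => PySem.Str.isIn word message_lower) then
    "I can't process deletions right now due to API constraints. Instead:\n\n\u2022 Delete tasks using the delete button in the UI\n\u2022 Retry in a few minutes\n\u2022 Tell me which task to delete for when I'm back online"
  else if (["search", "find"]).any (fun word => PySem.Str.isIn word message_lower) then
    "Search is temporarily unavailable. Meanwhile:\n\n\u2022 Use the search bar in the task dashboard\n\u2022 Filter tasks by status or priority\n\u2022 Try your search again shortly"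
  else if (["recommend", "suggest", "priority"]).any (fun word => PySem.Str.isIn word message_lower) then
    "I can't provide recommendations right now, but here are some tips:\n\n\u2022 Focus on high-priority tasks first\n\u2022 Check tasks with approaching due dates\n\u2022 Review overdue tasks in your dashboard\n\u2022 I'll be able to give personalized suggestions soon!"
  else
    "I'm currently experiencing API limitations and can't process your request fully. However, you can:\n\n\u2022 Use the task management UI directly\n\u2022 Try again in a few minutes\n\u2022 Check https://status.google.com for Gemini API status\n\nYour data is safe, and I'll be back to help soon!"

-- ===== PORT B =====
def pvKeywords : List (List Char × Nat) :=
  [("create".toList, 0), ("add".toList, 0), ("new task".toList, 0),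
   ("list".toList, 1), ("show".toList, 1), ("view".toList, 1), ("tasks".toList, 1),
   ("update".toList, 2), ("edit".toList, 2), ("change".toList, 2), ("modify".toList, 2),
   ("delete".toList, 3), ("remove".toList, 3), ("cancel".toList, 3),
   ("search".toList, 4), ("find".toList, 4),
   ("recommend".toList, 5), ("suggest".toList, 5), ("priority".toList, 5)]

def pvResponses : List String :=
  [ "I'd like to help you create a task, but I'm currently experiencing API limitations. Please try one of these:\n\n\u2022 Use the task creation form directly in the UI\n\u2022 Try again in a few minutes\n\u2022 Or tell me: What task would you like to create? (title, description, priority, due date)",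
    "I can't fetch your tasks right now due to API limits, but you can:\n\n\u2022 View all tasks in the main dashboard\n\u2022 Refresh the page to see your latest tasks\n\u2022 Try asking again in a moment",
    "I'm unable to process task updates at the moment. You can:\n\n\u2022 Edit tasks directly from the task list\n\u2022 Try again shortly\n\u2022 Let me know which task you want to update and I'll help once available",
    "I can't process deletions right now due to API constraints. Instead:\n\n\u2022 Delete tasks using the delete button in the UI\n\u2022 Retry in a few minutes\n\u2022 Tell me which task to delete for when I'm back online",
    "Search is temporarily unavailable. Meanwhile:\n\n\u2022 Use the search bar in the task dashboard\n\u2022 Filter tasks by status or priority\n\u2022 Try your search again shortly",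
    "I can't provide recommendations right now, but here are some tips:\n\n\u2022 Focus on high-priority tasks first\n\u2022 Check tasks with approaching due dates\n\u2022 Review overdue tasks in your dashboard\n\u2022 I'll be able to give personalized suggestions soon!",
    "I'm currently experiencing API limitations and can't process your request fully. However, you can:\n\n\u2022 Use the task management UI directly\n\u2022 Try again in a few minutes\n\u2022 Check https://status.google.com for Gemini API status\n\nYour data is safe, and I'll be back to help soon!" ]

-- inner loop: at the current position (suffix l), lower `best` to the index of any keyword starting here
def pvStep (l : List Char) (b : Nat) : Nat :=
  pvKeywords.foldl (fun b kg => if kg.2 < b && kg.1.isPrefixOf l then kg.2 else b) b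

-- outer loop: every position of the message, i.e. every suffix
def pvScan : List Char → Nat → Nat
  | [], b => b
  | c :: t, b => pvScan t (pvStep (c :: t) b)

def get_task_management_fallback_alt (user_message : String) : String :=
  pvResponses.getD (pvScan (PySem.Str.lower user_message).toList 6) ""

-- ===== PRECONDITION & SPEC =====
def Spec_get_task_management_fallback (user_message : String) (out : String) : Prop := out = get_task_management_fallback_alt user_message
instance (user_message : String) (out : String) : Decidable (Spec_get_task_management_fallback user_message out) := by unfold Spec_get_task_management_fallback; infer_instance

-- ===== CLAIM (what is proved, stated in full; the proofs are below) =====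
def Claim_equal_get_task_management_fallback : Prop := ∀ (user_message : String), Dom_get_task_management_fallback user_message → Spec_get_task_management_fallback user_message (get_task_management_fallback user_message)

-- ===== LEMMAS AND PROOFS =====

-- "group g matches the lowered message l"
def pvMt (l : List Char) (g : Nat) : Prop :=
  ∃ kw, (kw, g) ∈ pvKeywords ∧ PySem.Chars.isIn kw l = true

lemma pvKeywords_wf : ∀ kg ∈ pvKeywords, kg.2 < 6 ∧ kg.1 ≠ [] := by decide

lemma pvFold_le (kgs : List (List Char × Nat)) (l : List Char) (b : Nat) :
    kgs.foldl (fun b kg => if kg.2 < b && kg.1.isPrefixOf l then kg.2 else b) b ≤ b := by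
  induction kgs generalizing b with
  | nil => exact le_refl b
  | cons a kgs ih =>
    refine le_trans (ih _) ?_
    by_cases h : (a.2 < b && a.1.isPrefixOf l) = true
    · simp [h]
      simp [Bool.and_eq_true, decide_eq_true_eq] at h
      omega
    · simp [h]

lemma pvFold_witness (kgs : List (List Char × Nat)) (l : List Char) (b : Nat) :
    kgs.foldl (fun b kg => if kg.2 < b && kg.1.isPrefixOf l then kg.2 else b) b = b ∨
      ∃ kg ∈ kgs, kgs.foldl (fun b kg => if kg.2 < b && kg.1.isPrefixOf l then kg.2 else b) b = kg.2 ∧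
        kg.1.isPrefixOf l = true := by
  induction kgs generalizing b with
  | nil => exact Or.inl rfl
  | cons a kgs ih =>
    rcases ih ((fun b kg => if kg.2 < b && kg.1.isPrefixOf l then kg.2 else b) b a) with h | ⟨kg, hmem, heq, hpre⟩
    · by_cases hc : (a.2 < b && a.1.isPrefixOf l) = true
      · refine Or.inr ⟨a, List.mem_cons_self .., ?_, ?_⟩
        · simpa [List.foldl, hc] using h
        · exact List.isPrefixOf_iff_prefix.mpr (by simp [Bool.and_eq_true] at hc; exact hc.2)
      · exact Or.inl (by simpa [List.foldl, hc] using h)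
    · exact Or.inr ⟨kg, List.mem_cons_of_mem _ hmem, heq, hpre⟩

lemma pvFold_ub (kgs : List (List Char × Nat)) (l : List Char) (b : Nat)
    (kg : List Char × Nat) (hmem : kg ∈ kgs) (hpre : kg.1.isPrefixOf l = true) :
    kgs.foldl (fun b kg => if kg.2 < b && kg.1.isPrefixOf l then kg.2 else b) b ≤ kg.2 := by
  induction kgs generalizing b with
  | nil => cases hmem
  | cons a kgs ih =>
    rcases List.mem_cons.mp hmem with rfl | hmem'
    · refine le_trans (pvFold_le kgs l _) ?_
      by_cases h : kg.2 < b
      · simp [h, hpre]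
      · simp [h, hpre]; omega
    · exact ih _ hmem'

lemma pvStep_le (l : List Char) (b : Nat) : pvStep l b ≤ b := pvFold_le _ _ _

lemma pvScan_le (l : List Char) (b : Nat) : pvScan l b ≤ b := by
  induction l generalizing b with
  | nil => exact le_refl b
  | cons c t ih => exact le_trans (ih _) (pvStep_le _ _)

lemma pvScan_witness (l : List Char) (b : Nat) :
    pvScan l b = b ∨ pvMt l (pvScan l b) := by
  induction l generalizing b with
  | nil => exact Or.inl rfl
  | cons c t ih =>
    rcases ih (pvStep (c :: t) b) with h | hmt
    · show pvScan t (pvStep (c :: t) b) = b ∨ _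
      rcases pvFold_witness pvKeywords (c :: t) b with h2 | ⟨kg, hmem, heq, hpre⟩
      · exact Or.inl (h.trans h2)
      · refine Or.inr ⟨kg.1, ?_, ?_⟩
        · rw [show pvScan (c :: t) b = kg.2 from h.trans heq]; exact hmem
        · exact (PySem.Chars.isIn_iff_infix _ _).mpr (List.IsPrefix.isInfix (List.isPrefixOf_iff_prefix.mp hpre))
    · refine Or.inr ?_
      obtain ⟨kw, hmem, hin⟩ := hmt
      refine ⟨kw, hmem, ?_⟩
      have := (PySem.Chars.isIn_iff_infix _ _).mp hin
      exact (PySem.Chars.isIn_iff_infix _ _).mpr (this.trans (List.suffix_cons c t).isInfix)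

lemma pvScan_ub (l : List Char) (b : Nat) (kg : List Char × Nat)
    (hmem : kg ∈ pvKeywords) (hin : PySem.Chars.isIn kg.1 l = true) :
    pvScan l b ≤ kg.2 := by
  have hne : kg.1 ≠ [] := (pvKeywords_wf kg hmem).2
  obtain ⟨j, hpre⟩ := (PySem.Chars.exists_prefix_drop_iff_isIn _ _).mpr hin
  clear hin
  induction l generalizing b j with
  | nil =>
    exact absurd (List.prefix_nil.mp (by simpa using hpre)) hne
  | cons c t ih =>
    cases j with
    | zero =>
      refine le_trans (pvScan_le t _) ?_
      exact pvFold_ub pvKeywords (c :: t) b kg hmem (List.isPrefixOf_iff_prefix.mpr (by simpa using hpre))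
    | succ n =>
      exact ih _ n (by simpa using hpre)

lemma pvScan_eq_of (l : List Char) (g : Nat) (hg : g < 6)
    (h : pvMt l g) (hlt : ∀ k, k < g → ¬ pvMt l k) : pvScan l 6 = g := by
  obtain ⟨kw, hmem, hin⟩ := h
  have hub : pvScan l 6 ≤ g := pvScan_ub l 6 (kw, g) hmem hin
  rcases pvScan_witness l 6 with h6 | hmt
  · omega
  · by_contra hne
    exact hlt _ (lt_of_le_of_ne hub hne) hmt

lemma pvScan_eq_six (l : List Char) (h : ∀ k, k < 6 → ¬ pvMt l k) : pvScan l 6 = 6 := by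
  rcases pvScan_witness l 6 with h6 | hmt
  · exact h6
  · obtain ⟨kw, hmem, hin⟩ := hmt
    exact absurd ⟨kw, hmem, hin⟩ (h _ (pvKeywords_wf (kw, pvScan l 6) hmem).1)

-- the cascade conditions of A, group by group, as pvMt
lemma pvCond0 (m : String) :
    ((["create", "add", "new task"] : List String).any (fun word => PySem.Str.isIn word m)) = true ↔ pvMt m.toList 0 := by
  simp [pvMt, pvKeywords]
lemma pvCond1 (m : String) :
    ((["list", "show", "view", "tasks"] : List String).any (fun word => PySem.Str.isIn word m)) = true ↔ pvMt m.toList 1 := by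
  simp [pvMt, pvKeywords]
lemma pvCond2 (m : String) :
    ((["update", "edit", "change", "modify"] : List String).any (fun word => PySem.Str.isIn word m)) = true ↔ pvMt m.toList 2 := by
  simp [pvMt, pvKeywords]
lemma pvCond3 (m : String) :
    ((["delete", "remove", "cancel"] : List String).any (fun word => PySem.Str.isIn word m)) = true ↔ pvMt m.toList 3 := by
  simp [pvMt, pvKeywords]
lemma pvCond4 (m : String) :
    ((["search", "find"] : List String).any (fun word => PySem.Str.isIn word m)) = true ↔ pvMt m.toList 4 := by
  simp [pvMt, pvKeywords]
lemma pvCond5 (m : String) :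
    ((["recommend", "suggest", "priority"] : List String).any (fun word => PySem.Str.isIn word m)) = true ↔ pvMt m.toList 5 := by
  simp [pvMt, pvKeywords]

-- ===== VERDICT (by name: the statement is the Claim_ definition above) =====
theorem get_task_management_fallback_spec : Claim_equal_get_task_management_fallback := by
  intro msg _
  show get_task_management_fallback msg = get_task_management_fallback_alt msg
  unfold get_task_management_fallback get_task_management_fallback_alt
  set m := PySem.Str.lower msg with hm
  set l := m.toList with hl
  by_cases h0 : pvMt l 0
  · rw [pvScan_eq_of l 0 (by omega) h0 (by omega), if_pos ((pvCond0 m).mpr h0)]; rfl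
  by_cases h1 : pvMt l 1
  · rw [pvScan_eq_of l 1 (by omega) h1 (by intro k hk; interval_cases k; assumption),
      if_neg ((pvCond0 m).not.mpr h0), if_pos ((pvCond1 m).mpr h1)]; rfl
  by_cases h2 : pvMt l 2
  · rw [pvScan_eq_of l 2 (by omega) h2 (by intro k hk; interval_cases k <;> assumption),
      if_neg ((pvCond0 m).not.mpr h0), if_neg ((pvCond1 m).not.mpr h1),
      if_pos ((pvCond2 m).mpr h2)]; rfl
  by_cases h3 : pvMt l 3
  · rw [pvScan_eq_of l 3 (by omega) h3 (by intro k hk; interval_cases k <;> assumption),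
      if_neg ((pvCond0 m).not.mpr h0), if_neg ((pvCond1 m).not.mpr h1),
      if_neg ((pvCond2 m).not.mpr h2), if_pos ((pvCond3 m).mpr h3)]; rfl
  by_cases h4 : pvMt l 4
  · rw [pvScan_eq_of l 4 (by omega) h4 (by intro k hk; interval_cases k <;> assumption),
      if_neg ((pvCond0 m).not.mpr h0), if_neg ((pvCond1 m).not.mpr h1),
      if_neg ((pvCond2 m).not.mpr h2), if_neg ((pvCond3 m).not.mpr h3),
      if_pos ((pvCond4 m).mpr h4)]; rfl
  by_cases h5 : pvMt l 5
  · rw [pvScan_eq_of l 5 (by omega) h5 (by intro k hk; interval_cases k <;> assumption),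
      if_neg ((pvCond0 m).not.mpr h0), if_neg ((pvCond1 m).not.mpr h1),
      if_neg ((pvCond2 m).not.mpr h2), if_neg ((pvCond3 m).not.mpr h3),
      if_neg ((pvCond4 m).not.mpr h4), if_pos ((pvCond5 m).mpr h5)]; rfl
  · rw [pvScan_eq_six l (by intro k hk; interval_cases k <;> assumption),
      if_neg ((pvCond0 m).not.mpr h0), if_neg ((pvCond1 m).not.mpr h1),
      if_neg ((pvCond2 m).not.mpr h2), if_neg ((pvCond3 m).not.mpr h3),
      if_neg ((pvCond4 m).not.mpr h4), if_neg ((pvCond5 m).not.mpr h5)]; rfl
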